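-- pv_equiv track=rewrite | github.com/SarathiManikandan0/Interview_Q-A_Python | Interview Q&A Python/Tower Range Calculation.py | tower_range
-- ===== SOURCE A (Python) =====
-- def tower_range(n,heights):
--     ranges = [1] * n
--
--     for i in range(1,n):
--         j = i - 1
--
--         while j >= 0 and heights[j] <= heights[i]:
--             ranges[i] +=1
--             j -= 1
--     return ranges
-- ===== SOURCE B (Python) =====
-- def tower_range(n, heights):
--     ranges = []
--     stack = []  # indices whose heights are strictly decreasing; top at the end
--     for i in range(n):
--         h = heights[i]
--         while stack and heights[stack[-1]] <= h:
--             stack.pop()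
--         ranges.append(i + 1 if not stack else i - stack[-1])
--         stack.append(i)
--     return ranges
-- ===== Notes on version B (the rewrite author's own statement) =====
-- stated objective: faster
-- what changed: Replaced the quadratic per-tower backward rescan with a single pass keeping a monotonic stack of previous-strictly-greater indices, so ranges[i] = i - prevGreater(i) is read off in amortized O(1).
-- outside the precondition, e.g. on tower_range(1, []): A returns [1], B raises IndexError
import Mathlib
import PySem

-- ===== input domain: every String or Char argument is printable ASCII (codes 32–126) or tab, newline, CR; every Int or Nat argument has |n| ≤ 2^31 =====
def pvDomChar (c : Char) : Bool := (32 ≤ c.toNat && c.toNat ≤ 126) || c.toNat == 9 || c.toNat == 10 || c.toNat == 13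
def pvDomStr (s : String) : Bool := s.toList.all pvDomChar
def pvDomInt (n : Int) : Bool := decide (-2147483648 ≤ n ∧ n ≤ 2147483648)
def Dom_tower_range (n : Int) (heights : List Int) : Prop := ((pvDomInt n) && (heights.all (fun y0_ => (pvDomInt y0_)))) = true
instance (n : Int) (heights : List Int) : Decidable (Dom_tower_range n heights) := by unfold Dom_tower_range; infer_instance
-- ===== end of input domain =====

-- B replaces A's quadratic backward rescan per tower by a one-pass monotonic stack
-- of previous-strictly-greater indices (objective: faster, asymptotic).


-- ===== PORT A =====
-- A's inner 'while j >= 0 and heights[j] <= heights[i]: ranges[i] += 1; j -= 1'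
-- as a downward structural recursion returning the number of iterations
-- (k encodes j + 1; heights.getD is exact inside Pre_, where every index is in range).
def pvCnt (hs : List Int) (v : Int) : Nat → Int
  | 0 => 0
  | k+1 => if hs.getD k 0 ≤ v then 1 + pvCnt hs v k else 0

def tower_range (n : Int) (heights : List Int) : List Int :=
  let ranges := List.replicate n.toNat 1        -- [1] * n  (empty for n ≤ 0, as in Python)
  (PySem.List.pyRange 1 n 1).foldl
    (fun r i => r.set i.toNat (1 + pvCnt heights (heights.getD i.toNat 0) i.toNat))
    ranges

-- ===== PORT B =====
-- B's 'while stack and heights[stack[-1]] <= h: stack.pop()' ; stack top is the list head here.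
def pvPop (hs : List Int) (v : Int) : List Int → List Int
  | [] => []
  | t :: rest => if hs.getD t.toNat 0 ≤ v then pvPop hs v rest else t :: rest

def tower_range_alt (n : Int) (heights : List Int) : List Int :=
  ((PySem.List.pyRange 0 n 1).foldl
    (fun st i =>
      let h := heights.getD i.toNat 0
      let stack := pvPop heights h st.2
      (st.1 ++ [match stack with | [] => i + 1 | t :: _ => i - t], i :: stack))
    (([] : List Int), ([] : List Int))).1

-- ===== PRECONDITION & SPEC =====
-- Pre_ excludes n > len(heights): there A raises IndexError for n ≥ 2, and on the
-- degenerate n = 1 with too-short heights A returns [1] without ever reading heights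
-- while B's natural indexing raises IndexError (see cites).
def Pre_tower_range (n : Int) (heights : List Int) : Prop := n ≤ (heights.length : Int)
instance (n : Int) (heights : List Int) : Decidable (Pre_tower_range n heights) := by unfold Pre_tower_range; infer_instance
def pvWitness_tower_range : Int × List Int := (4, [2, 1, 3, 3])

def Spec_tower_range (n : Int) (heights : List Int) (out : List Int) : Prop := out = tower_range_alt n heights
instance (n : Int) (heights : List Int) (out : List Int) : Decidable (Spec_tower_range n heights out) := by unfold Spec_tower_range; infer_instance

-- ===== CLAIM (what is proved, stated in full; the proofs are below) =====
def Claim_equal_tower_range : Prop := ∀ (n : Int) (heights : List Int), Dom_tower_range n heights → Pre_tower_range n heights → Spec_tower_range n heights (tower_range n heights)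

-- ===== LEMMAS AND PROOFS =====

-- the common value both programs compute for tower i
def pvSpec (hs : List Int) (i : Nat) : Int := 1 + pvCnt hs (hs.getD i 0) i

-- G hs v i = index of the first j < i (scanning i-1, i-2, …) with hs[j] > v, or -1
def pvG (hs : List Int) (v : Int) (i : Nat) : Int := (i : Int) - 1 - pvCnt hs v i

theorem pvCnt_nonneg (hs : List Int) (v : Int) (k : Nat) : 0 ≤ pvCnt hs v k := by
  induction k with
  | zero => simp [pvCnt]
  | succ k ih => simp only [pvCnt]; split <;> omega

theorem pvCnt_le (hs : List Int) (v : Int) (k : Nat) : pvCnt hs v k ≤ (k : Int) := by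
  induction k with
  | zero => simp [pvCnt]
  | succ k ih => simp only [pvCnt]; split <;> push_cast <;> omega

theorem pvG_lt (hs : List Int) (v : Int) (i : Nat) : pvG hs v i < (i : Int) := by
  have := pvCnt_nonneg hs v i; unfold pvG; omega

theorem pvG_ge (hs : List Int) (v : Int) (i : Nat) : -1 ≤ pvG hs v i := by
  have := pvCnt_le hs v i; unfold pvG; omega

-- every index strictly between G and i is ≤ v
theorem pvG_mem (hs : List Int) (v : Int) (i : Nat) :
    ∀ t : Nat, t < i → pvG hs v i < (t : Int) → hs.getD t 0 ≤ v := by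
  induction i with
  | zero => intro t ht _; omega
  | succ i ih =>
    intro t ht hgt
    by_cases hle : hs.getD i 0 ≤ v
    · have hG : pvG hs v (i+1) = pvG hs v i := by
        unfold pvG; simp only [pvCnt, if_pos hle]; push_cast; ring
      rcases Nat.lt_succ_iff_lt_or_eq.mp ht with h | h
      · exact ih t h (by rw [hG] at hgt; exact hgt)
      · subst h; exact hle
    · have hG : pvG hs v (i+1) = (i : Int) := by
        unfold pvG; simp only [pvCnt, if_neg hle]; push_cast; ring
      rw [hG] at hgt; omega

-- scanning skips any block known to be all ≤ v
theorem pvCnt_skip (hs : List Int) (v : Int) (m : Nat) :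
    ∀ j : Nat, m ≤ j → (∀ t : Nat, m ≤ t → t < j → hs.getD t 0 ≤ v) →
      pvCnt hs v j = ((j : Int) - m) + pvCnt hs v m := by
  intro j
  induction j with
  | zero =>
    intro hm _
    have hm0 : m = 0 := by omega
    subst hm0
    simp
  | succ j ih =>
    intro hm hall
    by_cases h : m ≤ j
    · have hle : hs.getD j 0 ≤ v := hall j h (by omega)
      have hstep := ih h (fun t ht1 ht2 => hall t ht1 (by omega))
      simp only [pvCnt, if_pos hle, hstep]; push_cast; ring
    · have hmj : m = j + 1 := by omega
      subst hmj
      simp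

def pvPg (hs : List Int) (i : Nat) : Int := pvG hs (hs.getD i 0) i

-- jump lemma: scanning past j (with hs[j] ≤ v) lands where scanning from j's own
-- previous-greater index would
theorem pvG_jump (hs : List Int) (v : Int) (j : Nat) (hle : hs.getD j 0 ≤ v) :
    pvG hs v (j+1) = if pvPg hs j < 0 then -1 else pvG hs v ((pvPg hs j).toNat + 1) := by
  have hG1 : pvG hs v (j+1) = pvG hs v j := by
    unfold pvG; simp only [pvCnt, if_pos hle]; push_cast; ring
  rw [hG1]
  by_cases hp : pvPg hs j < 0
  · rw [if_pos hp]
    have hp' : pvG hs (hs.getD j 0) j < 0 := hp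
    have hall : ∀ t : Nat, 0 ≤ t → t < j → hs.getD t 0 ≤ v := by
      intro t _ ht
      exact le_trans (pvG_mem hs (hs.getD j 0) j t ht (by omega)) hle
    have hsk := pvCnt_skip hs v 0 j (by omega) hall
    unfold pvG
    simp [pvCnt] at hsk
    omega
  · rw [if_neg hp]
    have hp' : 0 ≤ pvG hs (hs.getD j 0) j := by unfold pvPg at hp; omega
    have hplt : pvG hs (hs.getD j 0) j < (j : Int) := pvG_lt hs (hs.getD j 0) j
    have hm : (pvPg hs j).toNat + 1 ≤ j := by unfold pvPg; omega
    have hall : ∀ t : Nat, (pvPg hs j).toNat + 1 ≤ t → t < j → hs.getD t 0 ≤ v := by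
      intro t ht1 ht2
      unfold pvPg at ht1
      exact le_trans (pvG_mem hs (hs.getD j 0) j t ht2 (by omega)) hle
    have hsk := pvCnt_skip hs v ((pvPg hs j).toNat + 1) j hm hall
    unfold pvG at *
    unfold pvPg at *
    rw [hsk]
    push_cast
    omega

-- the stack after processing 0..i: [i, P i, P (P i), …] down to the bottom
def pvChain (hs : List Int) : Nat → List Int
  | i =>
    (i : Int) :: (if h : pvPg hs i < 0 then [] else
      have : (pvPg hs i).toNat < i := by
        have h1 := pvG_lt hs (hs.getD i 0) i
        unfold pvPg at h ⊢; omega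
      pvChain hs (pvPg hs i).toNat)

theorem pvPop_chain (hs : List Int) (v : Int) :
    ∀ i : Nat, pvPop hs v (pvChain hs i) =
      if pvG hs v (i+1) < 0 then [] else pvChain hs (pvG hs v (i+1)).toNat := by
  intro i
  induction i using Nat.strong_induction_on with
  | _ i ih =>
    rw [pvChain]
    by_cases hle : hs.getD i 0 ≤ v
    · simp only [pvPop, Int.toNat_natCast, if_pos hle]
      rw [pvG_jump hs v i hle]
      by_cases hp : pvPg hs i < 0
      · simp [hp, pvPop]
      · have hlt : (pvPg hs i).toNat < i := by
          have h1 := pvG_lt hs (hs.getD i 0) i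
          unfold pvPg at hp ⊢; omega
        simp only [dif_neg hp, if_neg hp]
        exact ih _ hlt
    · simp only [pvPop, Int.toNat_natCast, if_neg hle]
      have hG : pvG hs v (i+1) = (i : Int) := by
        unfold pvG; simp only [pvCnt, if_neg hle]; push_cast; ring
      rw [hG, if_neg (by omega), Int.toNat_natCast]
      conv_rhs => rw [pvChain]

-- value appended at step i equals pvSpec
theorem pvSpec_eq (hs : List Int) (i : Nat) : pvSpec hs i = (i : Int) - pvPg hs i := by
  unfold pvSpec pvPg pvG; ring

-- ===== B characterisation =====
def pvStep (hs : List Int) (st : List Int × List Int) (i : Int) : List Int × List Int :=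
  (st.1 ++ [match pvPop hs (hs.getD i.toNat 0) st.2 with | [] => i + 1 | t :: _ => i - t],
   i :: pvPop hs (hs.getD i.toNat 0) st.2)

theorem pvChain_head (hs : List Int) (i : Nat) : ∃ r, pvChain hs i = (i : Int) :: r := by
  rw [pvChain]; exact ⟨_, rfl⟩

theorem pvB_invariant (hs : List Int) :
    ∀ k : Nat, (PySem.List.pyRange 0 (k : Int) 1).foldl (pvStep hs) ([], []) =
      ((List.range k).map (pvSpec hs), if k = 0 then [] else pvChain hs (k-1)) := by
  intro k
  induction k with
  | zero => simp [PySem.List.pyRange_one_eq_nil]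
  | succ k ih =>
    have hsplit : PySem.List.pyRange 0 ((k : Int) + 1) 1 =
        PySem.List.pyRange 0 (k : Int) 1 ++ [(k : Int)] := by
      exact PySem.List.pyRange_one_succ_right (by omega)
    have hcast : ((k + 1 : Nat) : Int) = (k : Int) + 1 := by push_cast; ring
    rw [hcast, hsplit, List.foldl_append, ih, List.range_succ, List.map_append]
    simp only [List.foldl_cons, List.foldl_nil]
    by_cases hk : k = 0
    · subst hk
      simp [pvStep, pvPop, pvSpec, pvCnt, pvChain, pvPg, pvG]
    · rw [if_neg hk]
      have hk1 : k - 1 + 1 = k := by omega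
      simp only [pvStep, Int.toNat_natCast]
      rw [pvPop_chain hs (hs.getD k 0) (k-1), hk1]
      by_cases hp : pvG hs (hs.getD k 0) k < 0
      · rw [if_pos hp]
        have hpg : pvPg hs k = -1 := by
          have := pvG_ge hs (hs.getD k 0) k; unfold pvPg; omega
        have hv : pvSpec hs k = (k : Int) + 1 := by rw [pvSpec_eq, hpg]; ring
        have hch : pvChain hs k = [(k : Int)] := by rw [pvChain]; simp [hpg]
        simp [hv, hch]
      · rw [if_neg hp]
        obtain ⟨r, hr⟩ := pvChain_head hs (pvG hs (hs.getD k 0) k).toNat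
        have hv : pvSpec hs k = (k : Int) - ((pvG hs (hs.getD k 0) k).toNat : Int) := by
          rw [pvSpec_eq]
          unfold pvPg
          rw [Int.toNat_of_nonneg (by omega)]
        have hch : pvChain hs k =
            (k : Int) :: pvChain hs (pvG hs (hs.getD k 0) k).toNat := by
          conv_lhs => rw [pvChain]
          rw [dif_neg (show ¬ pvPg hs k < 0 from hp)]
          rfl
        rw [hr]
        simp only [Prod.mk.injEq, List.map_cons, List.map_nil]
        refine ⟨?_, ?_⟩
        · congr 1
          rw [hv]
        · rw [if_neg (show ¬ k + 1 = 0 from by omega)]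
          simp only [Nat.add_sub_cancel]
          rw [hch, hr]

-- ===== A characterisation =====
def pvSet (hs : List Int) (r : List Int) (i : Int) : List Int :=
  r.set i.toNat (1 + pvCnt hs (hs.getD i.toNat 0) i.toNat)

theorem pvA_invariant (hs : List Int) (m : Nat) :
    ∀ k : Nat, (PySem.List.pyRange 1 (k : Int) 1).foldl (pvSet hs) (List.replicate m 1) =
      (List.range m).map (fun j => if 1 ≤ j ∧ j < k then pvSpec hs j else 1) := by
  intro k
  induction k with
  | zero =>
    rw [PySem.List.pyRange_one_eq_nil (by omega)]
    apply List.ext_getElem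
    · simp
    · intro j hj hj'
      simp only [List.foldl_nil, List.getElem_replicate, List.getElem_map, List.getElem_range]
      rw [if_neg (by omega)]
  | succ k ih =>
    by_cases hk : k = 0
    · subst hk
      rw [show ((1 : Nat) : Int) = 1 by norm_num, PySem.List.pyRange_one_eq_nil (by omega)]
      apply List.ext_getElem
      · simp
      · intro j hj hj'
        simp only [List.foldl_nil, List.getElem_replicate, List.getElem_map, List.getElem_range]
        rw [if_neg (by omega)]
    · have hsplit : PySem.List.pyRange 1 ((k : Int) + 1) 1 =
          PySem.List.pyRange 1 (k : Int) 1 ++ [(k : Int)] := by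
        exact PySem.List.pyRange_one_succ_right (by omega)
      have hcast : ((k + 1 : Nat) : Int) = (k : Int) + 1 := by push_cast; ring
      rw [hcast, hsplit, List.foldl_append, ih]
      simp only [List.foldl_cons, List.foldl_nil]
      unfold pvSet
      rw [Int.toNat_natCast]
      apply List.ext_getElem
      · simp
      · intro j hj hj'
        simp only [List.getElem_set, List.getElem_map, List.getElem_range]
        simp only [List.length_map, List.length_range] at hj
        by_cases hjk : k = j
        · subst hjk
          rw [if_pos rfl, if_pos (by omega)]
          unfold pvSpec; rfl
        · rw [if_neg hjk]
          by_cases hc : 1 ≤ j ∧ j < k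
          · rw [if_pos hc, if_pos ⟨hc.1, by omega⟩]
          · rw [if_neg hc, if_neg (by omega)]

theorem pvRange_truncate (a n : Int) (h : 0 ≤ a) :
    PySem.List.pyRange a n 1 = PySem.List.pyRange a (n.toNat : Int) 1 := by
  by_cases hn : 0 ≤ n
  · rw [Int.toNat_of_nonneg hn]
  · rw [PySem.List.pyRange_one_eq_nil (by omega), PySem.List.pyRange_one_eq_nil (by omega)]

theorem pv_both (n : Int) (heights : List Int) :
    tower_range n heights = tower_range_alt n heights := by
  unfold tower_range tower_range_alt
  rw [pvRange_truncate 1 n (by omega), pvRange_truncate 0 n (by omega)]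
  have hA := pvA_invariant heights n.toNat n.toNat
  have hB := pvB_invariant heights n.toNat
  rw [show (fun (r : List Int) (i : Int) =>
        r.set i.toNat (1 + pvCnt heights (heights.getD i.toNat 0) i.toNat)) = pvSet heights
      from rfl, hA]
  rw [show (fun (st : List Int × List Int) (i : Int) =>
        (st.1 ++ [match pvPop heights (heights.getD i.toNat 0) st.2 with
                  | [] => i + 1 | t :: _ => i - t],
         i :: pvPop heights (heights.getD i.toNat 0) st.2)) = pvStep heights
      from rfl, hB]
  apply List.ext_getElem
  · simp
  · intro j hj hj'
    have hjn : j < n.toNat := by simpa using hj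
    simp only [List.getElem_map, List.getElem_range]
    by_cases hc : 1 ≤ j ∧ j < n.toNat
    · rw [if_pos hc]
    · rw [if_neg hc]
      have hj0 : j = 0 := by omega
      subst hj0
      simp [pvSpec, pvCnt]

-- ===== VERDICT (by name: the statement is the Claim_ definition above) =====
theorem tower_range_spec : Claim_equal_tower_range := by
  intro n heights _ _
  unfold Spec_tower_range
  exact pv_both n heights
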